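-- pv_equiv track=rewrite | github.com/mahrens917/common | src/common/metadata_store_auto_updater_helpers/time_window_updater_helpers/message_counter.py | count_messages_in_windows
-- ===== SOURCE A (Python) =====
-- from typing import Any, Dict
--
-- def count_messages_in_windows(
--     hash_data: Dict[Any, Any],
--     hour_ago_str: str,
--     sixty_five_minutes_ago_str: str,
--     sixty_seconds_ago_str: str,
-- ) -> tuple[int, int, int]:
--     """
--     Count messages in different time windows.
--
--     Args:
--         hash_data: Redis hash data
--         hour_ago_str: Hour ago threshold
--         sixty_five_minutes_ago_str: 65 minutes ago threshold
--         sixty_seconds_ago_str: 60 seconds ago threshold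
--
--     Returns:
--         Tuple of (messages_last_hour, messages_last_65_minutes, messages_last_60_seconds)
--     """
--     messages_last_hour = 0
--     messages_last_65_minutes = 0
--     messages_last_60_seconds = 0
--
--     for datetime_str, message_count_str in hash_data.items():
--         datetime_str = datetime_str.decode() if isinstance(datetime_str, bytes) else datetime_str
--         message_count_str = message_count_str.decode() if isinstance(message_count_str, bytes) else message_count_str
--
--         try:
--             message_count = int(message_count_str)
--         except (  # policy_guard: allow-silent-handler
--             ValueError,
--             TypeError,
--         ):
--             message_count = 0
--
--         if datetime_str >= hour_ago_str:
--             messages_last_hour += message_count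
--         if datetime_str >= sixty_five_minutes_ago_str:
--             messages_last_65_minutes += message_count
--         if datetime_str >= sixty_seconds_ago_str:
--             messages_last_60_seconds += message_count
--
--     return messages_last_hour, messages_last_65_minutes, messages_last_60_seconds
-- ===== SOURCE B (Python) =====
-- def count_messages_in_windows(hash_data, hour_ago_str, sixty_five_minutes_ago_str, sixty_seconds_ago_str):
--     parsed = []
--     for datetime_str, message_count_str in hash_data.items():
--         datetime_str = datetime_str.decode() if isinstance(datetime_str, bytes) else datetime_str
--         message_count_str = message_count_str.decode() if isinstance(message_count_str, bytes) else message_count_str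
--         try:
--             message_count = int(message_count_str)
--         except (ValueError, TypeError):
--             message_count = 0
--         parsed.append((datetime_str, message_count))
--     # sort newest-first: entries passing a threshold form a prefix, so each
--     # window is answered by an early-exit prefix scan instead of a full filter
--     parsed.sort(key=lambda t: t[0], reverse=True)
--
--     def window(threshold):
--         total = 0
--         for d, c in parsed:
--             if d < threshold:
--                 break
--             total += c
--         return total
--
--     return (
--         window(hour_ago_str),
--         window(sixty_five_minutes_ago_str),
--         window(sixty_seconds_ago_str),
--     )
-- ===== Notes on version B (the rewrite author's own statement) =====
-- stated objective: alternative
-- what changed: B sorts the parsed entries by datetime descending and answers each threshold with an early-exit prefix scan (entries >= threshold form a prefix of the descending order), instead of A's single pass testing all three thresholds on every entry.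
import Mathlib
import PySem

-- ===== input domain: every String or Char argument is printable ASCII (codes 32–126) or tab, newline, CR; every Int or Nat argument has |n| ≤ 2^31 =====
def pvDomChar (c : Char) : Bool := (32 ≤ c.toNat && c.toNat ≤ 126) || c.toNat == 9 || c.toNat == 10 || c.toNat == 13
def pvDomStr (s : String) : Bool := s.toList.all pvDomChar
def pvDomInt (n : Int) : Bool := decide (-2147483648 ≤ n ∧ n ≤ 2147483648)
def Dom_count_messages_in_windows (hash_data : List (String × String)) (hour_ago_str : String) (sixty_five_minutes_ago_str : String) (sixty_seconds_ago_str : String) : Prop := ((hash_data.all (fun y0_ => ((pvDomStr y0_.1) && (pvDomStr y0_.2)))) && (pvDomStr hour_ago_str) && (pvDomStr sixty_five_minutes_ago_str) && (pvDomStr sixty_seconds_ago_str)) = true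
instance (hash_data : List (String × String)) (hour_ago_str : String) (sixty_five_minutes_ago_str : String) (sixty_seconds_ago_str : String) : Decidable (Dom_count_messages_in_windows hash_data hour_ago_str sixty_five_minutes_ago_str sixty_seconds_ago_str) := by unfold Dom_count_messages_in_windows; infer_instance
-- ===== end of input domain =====

-- B sorts the parsed entries by datetime descending and answers each threshold by an
-- early-exit prefix scan, instead of A's single pass testing all three thresholds per entry
-- (alternative algorithm, same results).

-- ===== PORT A =====
-- one fold over the items, three running counters, as in A's loop
def count_messages_in_windows (hash_data : List (String × String)) (hour_ago_str : String) (sixty_five_minutes_ago_str : String) (sixty_seconds_ago_str : String) : Int × Int × Int :=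
  hash_data.foldl (fun (acc : Int × Int × Int) kv =>
    let datetime_str := kv.1
    let message_count := (PySem.Int.ofStr? kv.2).getD 0   -- int(s) with ValueError -> 0
    let a1 := if datetime_str ≥ hour_ago_str then acc.1 + message_count else acc.1
    let a2 := if datetime_str ≥ sixty_five_minutes_ago_str then acc.2.1 + message_count else acc.2.1
    let a3 := if datetime_str ≥ sixty_seconds_ago_str then acc.2.2 + message_count else acc.2.2
    (a1, a2, a3)) (0, 0, 0)

-- ===== PORT B =====
-- 'def window(threshold)': the for-loop with break, total as accumulator
def pvWindow (parsed : List (String × Int)) (threshold : String) (total : Int) : Int :=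
  match parsed with
  | [] => total
  | (d, c) :: tl => if d < threshold then total else pvWindow tl threshold (total + c)

def count_messages_in_windows_alt (hash_data : List (String × String)) (hour_ago_str : String) (sixty_five_minutes_ago_str : String) (sixty_seconds_ago_str : String) : Int × Int × Int :=
  -- parse, then parsed.sort(key=lambda t: t[0], reverse=True)
  let parsed := PySem.List.sorted (hash_data.map (fun kv => (kv.1, (PySem.Int.ofStr? kv.2).getD 0))) (fun t => t.1) true
  (pvWindow parsed hour_ago_str 0,
   pvWindow parsed sixty_five_minutes_ago_str 0,
   pvWindow parsed sixty_seconds_ago_str 0)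

-- ===== PRECONDITION & SPEC =====
def Spec_count_messages_in_windows (hash_data : List (String × String)) (hour_ago_str : String) (sixty_five_minutes_ago_str : String) (sixty_seconds_ago_str : String) (out : Int × Int × Int) : Prop := out = count_messages_in_windows_alt hash_data hour_ago_str sixty_five_minutes_ago_str sixty_seconds_ago_str
instance (hash_data : List (String × String)) (hour_ago_str : String) (sixty_five_minutes_ago_str : String) (sixty_seconds_ago_str : String) (out : Int × Int × Int) : Decidable (Spec_count_messages_in_windows hash_data hour_ago_str sixty_five_minutes_ago_str sixty_seconds_ago_str out) := by unfold Spec_count_messages_in_windows; infer_instance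

-- ===== CLAIM =====
def Claim_equal_count_messages_in_windows : Prop := ∀ (hash_data : List (String × String)) (hour_ago_str : String) (sixty_five_minutes_ago_str : String) (sixty_seconds_ago_str : String), Dom_count_messages_in_windows hash_data hour_ago_str sixty_five_minutes_ago_str sixty_seconds_ago_str → Spec_count_messages_in_windows hash_data hour_ago_str sixty_five_minutes_ago_str sixty_seconds_ago_str (count_messages_in_windows hash_data hour_ago_str sixty_five_minutes_ago_str sixty_seconds_ago_str)

-- ===== LEMMAS AND PROOFS =====

-- the filtered sum characterising one window
def pvFSum (l : List (String × Int)) (thr : String) : Int :=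
  ((l.filter (fun q => thr ≤ q.1)).map (fun q => q.2)).sum

-- A's fold from arbitrary starting accumulators = start + the three filtered sums
theorem pv_fold_eq (hash_data : List (String × String)) (t1 t2 t3 : String) (a b c : Int) :
    hash_data.foldl (fun (acc : Int × Int × Int) kv =>
      let datetime_str := kv.1
      let message_count := (PySem.Int.ofStr? kv.2).getD 0
      let a1 := if datetime_str ≥ t1 then acc.1 + message_count else acc.1
      let a2 := if datetime_str ≥ t2 then acc.2.1 + message_count else acc.2.1
      let a3 := if datetime_str ≥ t3 then acc.2.2 + message_count else acc.2.2
      (a1, a2, a3)) (a, b, c)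
    = (a + pvFSum (hash_data.map (fun kv => (kv.1, (PySem.Int.ofStr? kv.2).getD 0))) t1,
       b + pvFSum (hash_data.map (fun kv => (kv.1, (PySem.Int.ofStr? kv.2).getD 0))) t2,
       c + pvFSum (hash_data.map (fun kv => (kv.1, (PySem.Int.ofStr? kv.2).getD 0))) t3) := by
  induction hash_data generalizing a b c with
  | nil => simp [pvFSum]
  | cons kv tl ih =>
    simp only [List.foldl_cons, List.map_cons]
    generalize (PySem.Int.ofStr? kv.2).getD 0 = m
    rw [ih]
    simp only [pvFSum, List.filter_cons, decide_eq_true_eq, ge_iff_le]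
    refine Prod.ext ?_ (Prod.ext ?_ ?_) <;> simp only [] <;>
      split_ifs <;> simp only [List.map_cons, List.sum_cons] <;> ring

-- filtered sum is invariant under permutation
theorem pvFSum_perm (l l' : List (String × Int)) (h : l.Perm l') (thr : String) :
    pvFSum l thr = pvFSum l' thr :=
  List.Perm.sum_eq (List.Perm.map _ (List.Perm.filter _ h))

-- on a descending list the prefix scan computes the filtered sum
theorem pvWindow_eq (l : List (String × Int)) (thr : String) (t : Int)
    (h : l.Pairwise (fun a b => b.1 ≤ a.1)) :
    pvWindow l thr t = t + pvFSum l thr := by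
  induction l generalizing t with
  | nil => simp [pvWindow, pvFSum]
  | cons q tl ih =>
    obtain ⟨hq, htl⟩ := List.pairwise_cons.mp h
    obtain ⟨d, c⟩ := q
    show (if d < thr then t else pvWindow tl thr (t + c)) = _
    by_cases hlt : d < thr
    · have hfil : List.filter (fun p => decide (thr ≤ p.1)) ((d, c) :: tl) = [] := by
        rw [List.filter_eq_nil_iff]
        intro p hp
        rcases List.mem_cons.mp hp with rfl | hp'
        · simp only [decide_eq_true_eq]
          exact not_le.mpr hlt
        · simp only [decide_eq_true_eq]
          exact not_le.mpr (lt_of_le_of_lt (hq p hp') hlt)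
      rw [if_pos hlt]
      show t = t + pvFSum ((d, c) :: tl) thr
      unfold pvFSum
      rw [hfil]
      simp
    · rw [if_neg hlt, ih (t + c) htl]
      have hle : thr ≤ d := not_lt.mp hlt
      show t + c + pvFSum tl thr = t + pvFSum ((d, c) :: tl) thr
      unfold pvFSum
      rw [List.filter_cons, if_pos (by simpa using hle)]
      simp only [List.map_cons, List.sum_cons]
      ring

-- ===== VERDICT =====
theorem count_messages_in_windows_spec : Claim_equal_count_messages_in_windows := by
  intro hd t1 t2 t3 _
  unfold Spec_count_messages_in_windows count_messages_in_windows count_messages_in_windows_alt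
  simp only []
  rw [pv_fold_eq]
  have hperm := PySem.List.sorted_perm (hd.map (fun kv => (kv.1, (PySem.Int.ofStr? kv.2).getD 0))) (fun t => t.1) true
  have hpair := PySem.List.sorted_pairwise_rev (hd.map (fun kv => (kv.1, (PySem.Int.ofStr? kv.2).getD 0))) (fun t => t.1)
  rw [pvWindow_eq _ t1 0 hpair, pvWindow_eq _ t2 0 hpair, pvWindow_eq _ t3 0 hpair,
      pvFSum_perm _ _ hperm t1, pvFSum_perm _ _ hperm t2, pvFSum_perm _ _ hperm t3]
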